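-- pv_equiv track=rewrite | github.com/jwhitehill/CompositionalClustering | ap.py | makeCombos
-- ===== SOURCE A (Python) =====
-- def makeCombos (N):
--     combos = []
--     comboInvMap = {}
--
--     for i in range(N):
--         comboInvMap[i] = []
--         combos.append((i,))
--         comboInvMap[i].append(len(combos) - 1)
--
--     for i in range(N-1):
--         for j in range(i + 1, N):
--             combos.append((i,j))
--             comboInvMap[i].append(len(combos) - 1)
--             comboInvMap[j].append(len(combos) - 1)
--     return combos, comboInvMap
-- ===== SOURCE B (Python) =====
-- def makeCombos(N):
--     combos = [(i,) for i in range(N)] \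
--         + [(i, j) for i in range(N - 1) for j in range(i + 1, N)]
--     offs = [N + i * (2 * N - i - 1) // 2 for i in range(N)]  # index of pair (i, i+1)
--     gs = [offs[a] - a - 1 for a in range(N)]                 # index of pair (a, e), minus e
--     comboInvMap = {e: [e] + [g + e for g in gs[:e]]
--                       + list(range(offs[e], offs[e] + N - e - 1))
--                    for e in range(N)}
--     return combos, comboInvMap
-- ===== Notes on version B (the rewrite author's own statement) =====
-- stated objective: alternative
-- what changed: A records each combo's index into the inverse map by appending while it builds the combo list; B builds the combo list by comprehensions and writes each key's index list down in closed form, computing the combo index of every pair arithmetically (off(i) = N + i*(2N-i-1)//2) with no index bookkeeping or dict mutation during construction.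
import Mathlib
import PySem

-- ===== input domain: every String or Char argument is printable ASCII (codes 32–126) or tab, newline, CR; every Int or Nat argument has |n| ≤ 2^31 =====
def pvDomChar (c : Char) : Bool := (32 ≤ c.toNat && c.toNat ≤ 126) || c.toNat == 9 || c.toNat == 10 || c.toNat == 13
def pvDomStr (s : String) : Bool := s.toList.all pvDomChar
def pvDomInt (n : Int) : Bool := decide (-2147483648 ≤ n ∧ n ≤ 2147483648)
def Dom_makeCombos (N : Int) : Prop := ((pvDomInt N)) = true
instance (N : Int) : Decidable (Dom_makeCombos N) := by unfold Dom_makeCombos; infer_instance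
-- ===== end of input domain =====

-- B writes each key's index list down in closed form (the combo index of a pair is computed
-- arithmetically) instead of A's scatter of appends into a dict while building (objective: alternative).

-- ===== PORT A =====
def makeCombos (N : Int) : List (List Int) × (List (Int × List Int)) :=
  let s0 : List (List Int) × PySem.Dict Int (List Int) := ([], PySem.Dict.empty)
  let s1 := (PySem.List.pyRange 0 N 1).foldl (fun st i =>
    let d := st.2.insert i []
    let combos := st.1 ++ [[i]]
    let d := d.modify i [] (fun v => v ++ [(combos.length : Int) - 1])
    (combos, d)) s0
  let s2 := (PySem.List.pyRange 0 (N - 1) 1).foldl (fun st i =>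
    (PySem.List.pyRange (i + 1) N 1).foldl (fun st j =>
      let combos := st.1 ++ [[i, j]]
      let d := st.2.modify i [] (fun v => v ++ [(combos.length : Int) - 1])
      let d := d.modify j [] (fun v => v ++ [(combos.length : Int) - 1])
      (combos, d)) st) s1
  (s2.1, s2.2.items)

-- ===== PORT B =====
def makeCombos_alt (N : Int) : List (List Int) × (List (Int × List Int)) :=
  let combos := (PySem.List.pyRange 0 N 1).map (fun i => [i]) ++
    (PySem.List.pyRange 0 (N - 1) 1).flatMap (fun i =>
      (PySem.List.pyRange (i + 1) N 1).map (fun j => [i, j]))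
  let offs := (PySem.List.pyRange 0 N 1).map (fun i =>
    N + PySem.Int.floordiv (i * (2 * N - i - 1)) 2)
  let gs := (PySem.List.pyRange 0 N 1).map (fun a => PySem.List.pyGetD offs a 0 - a - 1)
  let d := (PySem.List.pyRange 0 N 1).foldl (fun d e =>
    d.insert e ([e] ++ (PySem.List.slice gs none (some e)).map (fun g => g + e)
      ++ PySem.List.pyRange (PySem.List.pyGetD offs e 0)
          (PySem.List.pyGetD offs e 0 + N - e - 1) 1)) PySem.Dict.empty
  (combos, d.items)

-- ===== PRECONDITION & SPEC =====
def Spec_makeCombos (N : Int) (out : List (List Int) × (List (Int × List Int))) : Prop := out = makeCombos_alt N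
instance (N : Int) (out : List (List Int) × (List (Int × List Int))) : Decidable (Spec_makeCombos N out) := by unfold Spec_makeCombos; infer_instance

-- ===== CLAIM (what is proved, stated in full; the proofs are below) =====
def Claim_equal_makeCombos : Prop := ∀ (N : Int), Dom_makeCombos N → Spec_makeCombos N (makeCombos N)

-- ===== LEMMAS AND PROOFS =====

-- overwriting a key twice = overwriting it once (insert on a present key keeps its position)
theorem pv_insert_insert_self {κ ν : Type} [BEq κ] [LawfulBEq κ]
    (d : PySem.Dict κ ν) (k : κ) (v w : ν) :
    (d.insert k v).insert k w = d.insert k w := by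
  apply PySem.Dict.ext
  by_cases h : d.contains k = true
  · rw [PySem.Dict.items_insert_of_contains _ w (by simp [PySem.Dict.contains_insert_self]),
      PySem.Dict.items_insert_of_contains _ v h,
      PySem.Dict.items_insert_of_contains _ w h, List.map_map]
    apply List.map_congr_left
    intro p _
    by_cases hp : p.1 == k <;> simp [hp]
  · have h' : d.contains k = false := by simpa using h
    have h2 : ∀ p ∈ d.items, (p.1 == k) = false := by
      intro p hp
      have := h'
      simp only [PySem.Dict.contains, List.any_eq_false] at this
      exact Bool.not_eq_true _ ▸ (by simpa using this p hp)
    rw [PySem.Dict.items_insert_of_contains _ w (by simp [PySem.Dict.contains_insert_self]),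
      PySem.Dict.items_insert_of_not_contains _ v h',
      PySem.Dict.items_insert_of_not_contains _ w h', List.map_append]
    have hmap : d.items.map (fun p => if (p.1 == k) = true then (k, w) else p) = d.items := by
      apply List.map_congr_left ?_ |>.trans d.items.map_id
      intro p hp; simp [h2 p hp]
    simp [hmap]

-- enumerate of a mapped list
theorem pv_enumerate_map {α β : Type} (f : α → β) (xs : List α) (s : Int) :
    PySem.List.enumerate (xs.map f) s
      = (PySem.List.enumerate xs s).map (fun q => (q.1, f q.2)) := by
  induction xs generalizing s with
  | nil => simp [PySem.List.enumerate_nil]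
  | cons x xs ih => simp [PySem.List.enumerate_cons, ih]

-- enumerating range a..b starting at a pairs each element with itself
theorem pv_enumerate_pyRange_self (a b : Int) :
    PySem.List.enumerate (PySem.List.pyRange a b 1) a
      = (PySem.List.pyRange a b 1).map (fun i => (i, i)) := by
  by_cases h : a < b
  · have : (b - a).toNat ≠ 0 := by omega
    generalize hn : (b - a).toNat = n at *
    induction n generalizing a with
    | zero => omega
    | succ n ih =>
      rw [PySem.List.pyRange_one_cons h, PySem.List.enumerate_cons, List.map_cons]
      by_cases h2 : a + 1 < b
      · rw [ih (a+1) h2 (by omega) (by omega)]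
      · have : PySem.List.pyRange (a+1) b 1 = [] := PySem.List.pyRange_one_eq_nil (by omega)
        simp [this, PySem.List.enumerate_nil]
  · have : PySem.List.pyRange a b 1 = [] := PySem.List.pyRange_one_eq_nil (by omega)
    simp [this, PySem.List.enumerate_nil]

-- A's first loop: split the paired state into combos ++ an enumerate-indexed dict fold
theorem pv_L1 (li : List Int) (c : List (List Int)) (d : PySem.Dict Int (List Int)) :
    li.foldl (fun st i =>
        let d := st.2.insert i []
        let combos := st.1 ++ [[i]]
        let d := d.modify i [] (fun v => v ++ [(combos.length : Int) - 1])
        (combos, d)) (c, d)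
      = (c ++ li.map (fun i => [i]),
         (PySem.List.enumerate li (c.length : Int)).foldl
           (fun d q => (d.insert q.2 []).modify q.2 [] (fun v => v ++ [q.1])) d) := by
  induction li generalizing c d with
  | nil => simp [PySem.List.enumerate_nil]
  | cons x xs ih =>
    rw [List.foldl_cons, PySem.List.enumerate_cons, List.foldl_cons]
    have hl : ((c ++ [[x]]).length : Int) - 1 = (c.length : Int) := by simp
    simp only [hl]
    rw [ih]
    simp [List.append_assoc]

-- A's pair loop over an explicit pair list, state split likewise
theorem pv_L2 (ps : List (Int × Int)) (c : List (List Int)) (d : PySem.Dict Int (List Int)) :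
    ps.foldl (fun st p =>
        let combos := st.1 ++ [[p.1, p.2]]
        let d := st.2.modify p.1 [] (fun v => v ++ [(combos.length : Int) - 1])
        let d := d.modify p.2 [] (fun v => v ++ [(combos.length : Int) - 1])
        (combos, d)) (c, d)
      = (c ++ ps.map (fun p => [p.1, p.2]),
         (PySem.List.enumerate ps (c.length : Int)).foldl
           (fun d q => (d.modify q.2.1 [] (fun v => v ++ [q.1])).modify q.2.2 []
             (fun v => v ++ [q.1])) d) := by
  induction ps generalizing c d with
  | nil => simp [PySem.List.enumerate_nil]
  | cons x xs ih =>
    rw [List.foldl_cons, PySem.List.enumerate_cons, List.foldl_cons]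
    have hl : ((c ++ [[x.1, x.2]]).length : Int) - 1 = (c.length : Int) := by simp
    simp only [hl]
    rw [ih]
    simp [List.append_assoc]

-- flattening A's nested pair loop into a fold over the explicit pair list
theorem pv_nest {σ : Type} (lo : List Int) (N : Int) (h : σ → Int → Int → σ) (s : σ) :
    lo.foldl (fun st i => (PySem.List.pyRange (i+1) N 1).foldl (fun st j => h st i j) st) s
      = (lo.flatMap (fun i => (PySem.List.pyRange (i+1) N 1).map (fun j => (i, j)))).foldl
          (fun st p => h st p.1 p.2) s := by
  induction lo generalizing s with
  | nil => simp
  | cons x xs ih => simp [List.foldl_append, List.foldl_map, ih]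

theorem pv_nest' (N : Int) (s : List (List Int) × PySem.Dict Int (List Int)) :
    (PySem.List.pyRange 0 (N-1) 1).foldl (fun st i =>
      (PySem.List.pyRange (i+1) N 1).foldl (fun st j =>
        (st.1 ++ [[i, j]],
          (st.2.modify i [] fun v => v ++ [((st.1 ++ [[i, j]]).length : Int) - 1]).modify j []
            fun v => v ++ [((st.1 ++ [[i, j]]).length : Int) - 1])) st) s
      = ((PySem.List.pyRange 0 (N-1) 1).flatMap (fun i =>
          (PySem.List.pyRange (i+1) N 1).map (fun j => (i, j)))).foldl (fun st p =>
        (st.1 ++ [[p.1, p.2]],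
          (st.2.modify p.1 [] fun v => v ++ [((st.1 ++ [[p.1, p.2]]).length : Int) - 1]).modify p.2 []
            fun v => v ++ [((st.1 ++ [[p.1, p.2]]).length : Int) - 1])) s :=
  pv_nest _ N _ s

-- getD on a literal dict keyed by the mapped elements: the first matching key wins
theorem pv_getD_mk_map (ks : List Int) (f : Int → List Int) (k : Int) (hk : k ∈ ks) :
    (PySem.Dict.mk (ks.map (fun e => (e, f e)))).getD k [] = f k := by
  induction ks with
  | nil => cases hk
  | cons x xs ih =>
    by_cases hx : x = k
    · subst hx
      rw [PySem.Dict.getD_eq_get?_getD]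
      simp [PySem.Dict.get?_mk_cons]
    · have hk' : k ∈ xs := by cases hk with | head => exact absurd rfl hx | tail _ h => exact h
      rw [PySem.Dict.getD_eq_get?_getD] at ih ⊢
      simp only [List.map_cons, PySem.Dict.get?_mk_cons]
      simp [hx, ih hk']

-- modify on a literal pointwise dict updates the value function pointwise
theorem pv_modify_mk (ks : List Int) (f : Int → List Int) (k : Int) (hk : k ∈ ks)
    (g : List Int → List Int) :
    (PySem.Dict.mk (ks.map (fun e => (e, f e)))).modify k [] g
      = PySem.Dict.mk (ks.map (fun e => (e, if e = k then g (f e) else f e))) := by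
  have hcont : (PySem.Dict.mk (ks.map (fun e => (e, f e)))).contains k = true := by
    simp only [PySem.Dict.contains, List.any_eq_true]
    exact ⟨(k, f k), List.mem_map_of_mem hk, by simp⟩
  rw [PySem.Dict.modify, pv_getD_mk_map ks f k hk]
  apply PySem.Dict.ext
  rw [PySem.Dict.items_insert_of_contains _ _ hcont]
  simp only [List.map_map]
  apply List.map_congr_left
  intro e _
  by_cases he : e = k
  · subst he; simp
  · simp [he]

-- one pair step (two modifies, distinct keys) acts pointwise
theorem pv_pairstep (ks : List Int) (f : Int → List Int) (q : Int × (Int × Int))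
    (hi : q.2.1 ∈ ks) (hj : q.2.2 ∈ ks) (hne : q.2.1 ≠ q.2.2) :
    ((PySem.Dict.mk (ks.map (fun e => (e, f e)))).modify q.2.1 []
        (fun v => v ++ [q.1])).modify q.2.2 [] (fun v => v ++ [q.1])
      = PySem.Dict.mk (ks.map (fun e =>
          (e, f e ++ if q.2.1 == e || q.2.2 == e then [q.1] else []))) := by
  rw [pv_modify_mk ks f q.2.1 hi,
    pv_modify_mk ks (fun e => if e = q.2.1 then f e ++ [q.1] else f e) q.2.2 hj]
  congr 1
  apply List.map_congr_left
  intro e _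
  by_cases h1 : e = q.2.1
  · subst h1
    simp [hne]
  · have h1' : q.2.1 ≠ e := fun h => h1 h.symm
    by_cases h2 : e = q.2.2
    · subst h2
      simp [h1]
    · have h2' : q.2.2 ≠ e := fun h => h2 h.symm
      simp [h1, h2, h1', h2']

-- SCATTER = GATHER: folding the two-modify step over an indexed pair list, starting from a
-- pointwise dict, appends to each key exactly the indices of the pairs containing it
theorem pv_scatter (L : List (Int × (Int × Int))) (ks : List Int) (f : Int → List Int)
    (hL : ∀ q ∈ L, q.2.1 ∈ ks ∧ q.2.2 ∈ ks ∧ q.2.1 ≠ q.2.2) :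
    L.foldl (fun d q => (d.modify q.2.1 [] (fun v => v ++ [q.1])).modify q.2.2 []
        (fun v => v ++ [q.1])) (PySem.Dict.mk (ks.map (fun e => (e, f e))))
      = PySem.Dict.mk (ks.map (fun e =>
          (e, f e ++ (L.filter (fun q => q.2.1 == e || q.2.2 == e)).map (fun q => q.1)))) := by
  induction L generalizing f with
  | nil => simp
  | cons q L ih =>
    obtain ⟨hi, hj, hne⟩ := hL q (List.mem_cons_self)
    rw [List.foldl_cons, pv_pairstep ks f q hi hj hne,
      ih (fun e => f e ++ if q.2.1 == e || q.2.2 == e then [q.1] else [])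
        (fun p hp => hL p (List.mem_cons_of_mem _ hp))]
    congr 1
    apply List.map_congr_left
    intro e _
    by_cases h : (q.2.1 == e || q.2.2 == e) = true <;>
      simp [h, List.append_assoc]

-- membership facts about the explicit pair list
theorem pv_mem_pairP (N : Int) (p : Int × Int)
    (hp : p ∈ (PySem.List.pyRange 0 (N-1) 1).flatMap (fun i =>
      (PySem.List.pyRange (i+1) N 1).map (fun j => (i, j)))) :
    (0 ≤ p.1 ∧ p.1 < N) ∧ (0 ≤ p.2 ∧ p.2 < N) ∧ p.1 ≠ p.2 := by
  obtain ⟨i, hi, hp2⟩ := List.mem_flatMap.mp hp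
  obtain ⟨j, hj, rfl⟩ := List.mem_map.mp hp2
  rw [PySem.List.mem_pyRange_one] at hi hj
  refine ⟨⟨hi.1, by omega⟩, ⟨by omega, hj.2⟩, by omega⟩

-- closed-form offset: pvOff N i is the combo index of pair (i, i+1)
def pvOff (N i : Int) : Int := N + PySem.Int.floordiv (i * (2 * N - i - 1)) 2

theorem pv_floordiv_two_mul (m : Int) : PySem.Int.floordiv (2 * m) 2 = m := by
  rw [PySem.Int.floordiv_eq_ediv_of_pos (by norm_num)]
  exact Int.mul_ediv_cancel_left m (by norm_num)

theorem pv_off_even (N i : Int) : ∃ m, i * (2 * N - i - 1) = 2 * m := by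
  rcases Int.even_or_odd i with ⟨k, hk⟩ | ⟨k, hk⟩
  · exact ⟨k * (2 * N - i - 1), by rw [hk]; ring⟩
  · exact ⟨i * (N - k - 1), by rw [hk]; ring⟩

theorem pv_off_step (N a : Int) : pvOff N (a + 1) = pvOff N a + (N - 1 - a) := by
  obtain ⟨m, hm⟩ := pv_off_even N a
  obtain ⟨m', hm'⟩ := pv_off_even N (a + 1)
  have expand : (a + 1) * (2 * N - (a + 1) - 1) = a * (2 * N - a - 1) + 2 * (N - 1 - a) := by
    ring
  have key : 2 * m' = 2 * m + 2 * (N - 1 - a) := by rw [← hm', expand, hm]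
  unfold pvOff
  rw [hm, hm', pv_floordiv_two_mul, pv_floordiv_two_mul]
  omega

-- a filtered enumeration of a range missing e is empty
theorem pv_filter_range_ne (a b s e : Int) (h : e < a ∨ b ≤ e) :
    (PySem.List.enumerate (PySem.List.pyRange a b 1) s).filter
      (fun q : Int × Int => q.2 == e) = [] := by
  rw [List.filter_eq_nil_iff]
  intro q hq
  obtain ⟨k, hk, rfl⟩ := (PySem.List.mem_enumerate_iff _ _ _).mp hq
  have hmem := List.getElem_mem hk
  rw [PySem.List.mem_pyRange_one] at hmem
  dsimp only
  simp only [beq_iff_eq]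
  omega

-- a row with first component i < e contributes exactly the index of the pair (i, e)
theorem pv_row_lt (N e i s : Int) (hi : i < e) (heN : e < N) :
    ((PySem.List.enumerate ((PySem.List.pyRange (i + 1) N 1).map (fun j => (i, j))) s).filter
      (fun q => q.2.1 == e || q.2.2 == e)).map (fun q => q.1) = [s + (e - i - 1)] := by
  rw [pv_enumerate_map, List.filter_map, List.map_map]
  have hpred : ((fun q : Int × (Int × Int) => q.2.1 == e || q.2.2 == e) ∘
      (fun q : Int × Int => (q.1, (i, q.2)))) = fun q : Int × Int => q.2 == e := by
    funext q
    have hne : (i == e) = false := by simp; omega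
    simp [Function.comp, hne]
  rw [hpred]
  have hsplit : PySem.List.pyRange (i + 1) N 1
      = PySem.List.pyRange (i + 1) e 1 ++ (e :: PySem.List.pyRange (e + 1) N 1) := by
    rw [← PySem.List.pyRange_one_cons heN]
    exact PySem.List.pyRange_one_append (i + 1) e N (by omega) (by omega)
  rw [hsplit, PySem.List.enumerate_append, List.filter_append,
    PySem.List.enumerate_cons, List.filter_cons,
    pv_filter_range_ne (i + 1) e s e (Or.inr le_rfl),
    pv_filter_range_ne (e + 1) N _ e (Or.inl (by omega))]
  simp
  omega

theorem pv_range_shift (a b c : Int) :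
    (PySem.List.pyRange a b 1).map (fun j => c + (j - a)) = PySem.List.pyRange c (c + (b - a)) 1 := by
  rw [PySem.List.pyRange_one, PySem.List.pyRange_one, List.map_map]
  have ht : ((c + (b - a)) - c).toNat = (b - a).toNat := by omega
  rw [ht]
  apply List.map_congr_left
  intro k _
  simp only [Function.comp]
  omega

theorem pv_row_self (N e s : Int) (heN : e < N) :
    ((PySem.List.enumerate ((PySem.List.pyRange (e + 1) N 1).map (fun j => (e, j))) s).filter
      (fun q => q.2.1 == e || q.2.2 == e)).map (fun q => q.1)
    = (PySem.List.pyRange (e + 1) N 1).map (fun j => s + (j - e - 1)) := by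
  rw [pv_enumerate_map, List.filter_map, List.map_map]
  have hpred : ((fun q : Int × (Int × Int) => q.2.1 == e || q.2.2 == e) ∘
      (fun q : Int × Int => (q.1, (e, q.2)))) = fun _ : Int × Int => true := by
    funext q; simp
  rw [hpred, List.filter_true]
  have hfst : ((fun q : Int × (Int × Int) => q.1) ∘
      (fun q : Int × Int => (q.1, (e, q.2)))) = fun q : Int × Int => q.1 := rfl
  rw [hfst, PySem.List.map_fst_enumerate]
  have hfun : (PySem.List.pyRange (e + 1) N 1).map (fun j => s + (j - e - 1))
      = (PySem.List.pyRange (e + 1) N 1).map (fun j => s + (j - (e + 1))) := by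
    apply List.map_congr_left; intro j _; omega
  rw [hfun, pv_range_shift (e + 1) N s]
  have hlen : ((PySem.List.pyRange (e + 1) N 1).length : Int) = N - (e + 1) := by
    rw [PySem.List.length_pyRange_one]; omega
  rw [hlen]

-- all rows with first component above e contribute nothing
theorem pv_rows_gt (N e a s : Int) (hgt : e < a) :
    (PySem.List.enumerate ((PySem.List.pyRange a (N - 1) 1).flatMap (fun i =>
      (PySem.List.pyRange (i + 1) N 1).map (fun j => (i, j)))) s).filter
      (fun q => q.2.1 == e || q.2.2 == e) = [] := by
  rw [List.filter_eq_nil_iff]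
  intro q hq
  obtain ⟨k, hk, rfl⟩ := (PySem.List.mem_enumerate_iff _ _ _).mp hq
  have hmem := List.getElem_mem hk
  obtain ⟨i, hi, hq2⟩ := List.mem_flatMap.mp hmem
  obtain ⟨j, hj, hqe⟩ := List.mem_map.mp hq2
  rw [PySem.List.mem_pyRange_one] at hi hj
  dsimp only
  rw [← hqe]
  simp only [Bool.or_eq_true, beq_iff_eq]
  rintro (h | h) <;> omega

-- the filtered, enumerated pair rows from a up, started at offset pvOff N a, in closed form
theorem pv_seg (N e : Int) (he : 0 ≤ e ∧ e < N) (n : Nat) :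
    ∀ (a : Int), 0 ≤ a → a ≤ e → (e - a).toNat = n →
    ((PySem.List.enumerate ((PySem.List.pyRange a (N - 1) 1).flatMap (fun i =>
        (PySem.List.pyRange (i + 1) N 1).map (fun j => (i, j)))) (pvOff N a)).filter
      (fun q => q.2.1 == e || q.2.2 == e)).map (fun q => q.1)
    = (PySem.List.pyRange a e 1).map (fun i => pvOff N i + (e - i - 1))
      ++ (PySem.List.pyRange (e + 1) N 1).map (fun j => pvOff N e + (j - e - 1)) := by
  induction n with
  | zero =>
    intro a ha hae hn
    have hae' : a = e := by omega
    subst hae'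
    rw [PySem.List.pyRange_one_eq_nil (le_refl a), List.map_nil, List.nil_append]
    by_cases hNe : a < N - 1
    · rw [PySem.List.pyRange_one_cons hNe, List.flatMap_cons, PySem.List.enumerate_append,
        List.filter_append, List.map_append, pv_row_self N a (pvOff N a) he.2,
        pv_rows_gt N a (a + 1) _ (by omega)]
      simp
    · have h1 : PySem.List.pyRange a (N - 1) 1 = [] :=
        PySem.List.pyRange_one_eq_nil (by omega)
      have h2 : PySem.List.pyRange (a + 1) N 1 = [] :=
        PySem.List.pyRange_one_eq_nil (by omega)
      rw [h1, h2]
      simp [PySem.List.enumerate_nil]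
  | succ n ih =>
    intro a ha hae hn
    have hlt : a < e := by omega
    rw [PySem.List.pyRange_one_cons (show a < N - 1 by omega), List.flatMap_cons,
      PySem.List.enumerate_append, List.filter_append, List.map_append,
      pv_row_lt N e a (pvOff N a) hlt he.2]
    have hlen : ((((PySem.List.pyRange (a + 1) N 1).map (fun j => (a, j))).length : Int))
        = N - 1 - a := by
      rw [List.length_map, PySem.List.length_pyRange_one]; omega
    rw [hlen, show pvOff N a + (N - 1 - a) = pvOff N (a + 1) from (pv_off_step N a).symm,
      ih (a + 1) (by omega) (by omega) (by omega),
      PySem.List.pyRange_one_cons hlt, List.map_cons]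
    simp

-- A's first loop builds exactly the pointwise dict {i: [i]}
theorem pv_phase1 (N : Int) :
    (PySem.List.enumerate (PySem.List.pyRange 0 N 1) 0).foldl
        (fun d q => (d.insert q.2 []).modify q.2 [] (fun v => v ++ [q.1])) PySem.Dict.empty
      = PySem.Dict.mk ((PySem.List.pyRange 0 N 1).map (fun i => (i, [i]))) := by
  rw [pv_enumerate_pyRange_self, List.foldl_map]
  have hstep : ∀ (d : PySem.Dict Int (List Int)) (i : Int),
      (d.insert i []).modify i [] (fun v => v ++ [i]) = d.insert i [i] := by
    intro d i
    rw [PySem.Dict.modify, PySem.Dict.getD_insert_self, pv_insert_insert_self]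
    simp
  simp only [hstep]
  apply PySem.Dict.ext
  rw [PySem.Dict.items_foldl_insert_fresh (PySem.List.pyRange 0 N 1) (fun i => i)
      (fun i => [i]) _ (fun i _ => by simp [PySem.Dict.contains_empty])
      (by simpa using PySem.List.nodup_pyRange_one 0 N)]
  simp [PySem.Dict.empty]

-- B's closed-form value for key e, rewritten through the offs/gs tables
theorem pv_bval (N e : Int) (h0 : 0 ≤ e) (h1 : e < N) :
    [e] ++ (PySem.List.slice ((PySem.List.pyRange 0 N 1).map (fun a =>
        PySem.List.pyGetD ((PySem.List.pyRange 0 N 1).map (fun i =>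
          N + PySem.Int.floordiv (i * (2 * N - i - 1)) 2)) a 0 - a - 1)) none (some e)).map
      (fun g => g + e)
      ++ PySem.List.pyRange (PySem.List.pyGetD ((PySem.List.pyRange 0 N 1).map (fun i =>
          N + PySem.Int.floordiv (i * (2 * N - i - 1)) 2)) e 0)
        (PySem.List.pyGetD ((PySem.List.pyRange 0 N 1).map (fun i =>
          N + PySem.Int.floordiv (i * (2 * N - i - 1)) 2)) e 0 + N - e - 1) 1
    = [e] ++ (PySem.List.pyRange 0 e 1).map (fun i => pvOff N i + (e - i - 1))
      ++ (PySem.List.pyRange (e + 1) N 1).map (fun j => pvOff N e + (j - e - 1)) := by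
  have hoffs : ∀ a : Int, 0 ≤ a → a < N →
      PySem.List.pyGetD ((PySem.List.pyRange 0 N 1).map (fun i =>
        N + PySem.Int.floordiv (i * (2 * N - i - 1)) 2)) a 0 = pvOff N a := by
    intro a ha haN
    rw [PySem.List.pyGetD_map_pyRange_of_nonneg _ N a 0 ha haN]
    rfl
  rw [hoffs e h0 h1]
  congr 1
  congr 1
  · -- first segment: the sliced gs table
    rw [PySem.List.slice_to _ h0]
    have hgs : (PySem.List.pyRange 0 N 1).map (fun a =>
        PySem.List.pyGetD ((PySem.List.pyRange 0 N 1).map (fun i =>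
          N + PySem.Int.floordiv (i * (2 * N - i - 1)) 2)) a 0 - a - 1)
        = (PySem.List.pyRange 0 N 1).map (fun a => pvOff N a - a - 1) := by
      apply List.map_congr_left
      intro a haa
      rw [PySem.List.mem_pyRange_one] at haa
      rw [hoffs a haa.1 haa.2]
    rw [hgs]
    have hsplit : PySem.List.pyRange 0 N 1
        = PySem.List.pyRange 0 e 1 ++ PySem.List.pyRange e N 1 :=
      PySem.List.pyRange_one_append 0 e N h0 (by omega)
    have hlen : ((PySem.List.pyRange 0 e 1).map (fun a => pvOff N a - a - 1)).length
        = e.toNat := by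
      rw [List.length_map, PySem.List.length_pyRange_one]; omega
    rw [hsplit, List.map_append, List.take_left' hlen, List.map_map]
    apply List.map_congr_left
    intro a haa
    simp only [Function.comp]
    omega
  · -- second segment: a literal range
    have hfun : (PySem.List.pyRange (e + 1) N 1).map (fun j => pvOff N e + (j - e - 1))
        = (PySem.List.pyRange (e + 1) N 1).map (fun j => pvOff N e + (j - (e + 1))) := by
      apply List.map_congr_left; intro j _; omega
    rw [hfun, pv_range_shift (e + 1) N (pvOff N e)]
    have : pvOff N e + N - e - 1 = pvOff N e + (N - (e + 1)) := by ring
    rw [this]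

-- ===== VERDICT (by name: the statement is the Claim_ definition above) =====
theorem makeCombos_spec : Claim_equal_makeCombos := by
  intro N _
  unfold Spec_makeCombos makeCombos makeCombos_alt
  dsimp only
  rw [pv_L1]
  simp only [List.nil_append, List.length_nil, Nat.cast_zero]
  rw [pv_nest', pv_L2]
  set ks := PySem.List.pyRange 0 N 1 with hks
  set pairP := (PySem.List.pyRange 0 (N-1) 1).flatMap (fun i =>
    (PySem.List.pyRange (i+1) N 1).map (fun j => (i, j))) with hpairP
  have hcombos : pairP.map (fun p => [p.1, p.2])
      = (PySem.List.pyRange 0 (N-1) 1).flatMap (fun i =>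
          (PySem.List.pyRange (i+1) N 1).map (fun j => [i, j])) := by
    simp [hpairP, List.map_flatMap, List.map_map, Function.comp_def]
  rw [hcombos]
  -- the combo lists agree definitionally; reduce to the dicts' items
  refine Prod.ext rfl ?_
  dsimp only
  -- A side: phase 1 then scatter over the enumerated pairs
  rw [pv_phase1 N]
  have hsc := pv_scatter (PySem.List.enumerate pairP ((ks.map (fun i => [i])).length : Int))
    ks (fun i => [i]) ?cond
  case cond =>
    intro q hq
    obtain ⟨k, hk, rfl⟩ := (PySem.List.mem_enumerate_iff _ _ _).mp hq
    obtain ⟨⟨h1, h2⟩, ⟨h3, h4⟩, h5⟩ := pv_mem_pairP N pairP[k] (List.getElem_mem hk)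
    show pairP[k].1 ∈ ks ∧ pairP[k].2 ∈ ks ∧ pairP[k].1 ≠ pairP[k].2
    refine ⟨?_, ?_, h5⟩ <;>
      · rw [hks, PySem.List.mem_pyRange_one]; omega
  rw [hsc]
  -- B side: fresh-key insert loop builds the closed-form dict
  rw [PySem.Dict.items_foldl_insert_fresh ks (fun e => e)
      (fun e => [e] ++ (PySem.List.slice ((PySem.List.pyRange 0 N 1).map (fun a =>
          PySem.List.pyGetD ((PySem.List.pyRange 0 N 1).map (fun i =>
            N + PySem.Int.floordiv (i * (2 * N - i - 1)) 2)) a 0 - a - 1)) none (some e)).map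
        (fun g => g + e)
        ++ PySem.List.pyRange (PySem.List.pyGetD ((PySem.List.pyRange 0 N 1).map (fun i =>
            N + PySem.Int.floordiv (i * (2 * N - i - 1)) 2)) e 0)
          (PySem.List.pyGetD ((PySem.List.pyRange 0 N 1).map (fun i =>
            N + PySem.Int.floordiv (i * (2 * N - i - 1)) 2)) e 0 + N - e - 1) 1)
      _ (fun e _ => by simp [PySem.Dict.contains_empty])
      (by simpa using PySem.List.nodup_pyRange_one 0 N)]
  simp only [PySem.Dict.empty, List.nil_append]
  apply List.map_congr_left
  intro e he
  have heb : 0 ≤ e ∧ e < N := by rw [hks, PySem.List.mem_pyRange_one] at he; exact he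
  have hlen : ((ks.map (fun i => [i])).length : Int) = pvOff N 0 := by
    simp only [pvOff, List.length_map, hks, PySem.List.length_pyRange_one]
    rw [show (0 : Int) * (2 * N - 0 - 1) = 2 * 0 from by ring, pv_floordiv_two_mul]
    omega
  rw [hlen, pv_seg N e heb (e - 0).toNat 0 le_rfl heb.1 rfl, pv_bval N e heb.1 heb.2]
  simp
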